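-- pv_equiv track=rewrite | github.com/lnenadic/rs_vjezbe | rs_zadace/zadaca_1/nino-telefonino.py | prepoznaj_pozivni_broj
-- ===== SOURCE A (Python) =====
-- fiksni_brojevi = {
--     "01": "Grad Zagreb i Zagrebačka županija",
--     "020": "Dubrovačko-neretvanska županija",
--     "021": "Splitsko-dalmatinska županija",
--     "022": "Šibensko-kninska županija",
--     "023": "Zadarska županija",
--     "031": "Osječko-baranjska županija",
--     "032": "Vukovarsko-srijemska županija",
--     "033": "Virovitičko-podravska županija",
--     "034": "Požeško-slavonska županija",
--     "035": "Brodsko-posavska županija",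
--     "040": "Međimurska županija",
--     "042": "Varaždinska županija",
--     "043": "Bjelovarsko-bilogorska županija",
--     "044": "Sisačko-moslavačka županija",
--     "047": "Karlovačka županija",
--     "048": "Koprivničko-križevačka županija",
--     "049": "Krapinsko-zagorska županija",
--     "051": "Primorsko-goranska županija",
--     "052": "Istarska županija",
--     "053": "Ličko-senjska županija"
-- }
--
-- mobilni_brojevi = {
--     "091": "A1 Hrvatska",
--     "092": "Tomato",
--     "095": "Telemach",
--     "097": "bonbon",
--     "098": "Hrvatski Telekom",
--     "099": "Hrvatski Telekom"
-- }
--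
-- posebne_usluge = {
--     "0800": "Besplatni pozivi",
--     "060": "Komercijalni pozivi",
--     "061": "Glasovanje telefonom",
--     "064": "Usluge s neprimjerenim sadržajem",
--     "065": "Nagradne igre",
--     "069": "Usluge namijenjene djeci",
--     "072": "Jedinstveni pristupni broj za cijelu državu za posebne usluge"
-- }
--
-- def prepoznaj_pozivni_broj(ocisceni_broj: str):
--     for pozivni in sorted(posebne_usluge.keys(), key=len, reverse=True):
--         if ocisceni_broj.startswith(pozivni):
--             ostatak = ocisceni_broj[len(pozivni):]
--             return (pozivni, ostatak, "posebne usluge", posebne_usluge[pozivni])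
--
--     for pozivni in sorted(mobilni_brojevi.keys(), key=len, reverse=True):
--         if ocisceni_broj.startswith(pozivni):
--             ostatak = ocisceni_broj[len(pozivni):]
--             return (pozivni, ostatak, "mobilna mreža", mobilni_brojevi[pozivni])
--
--     for pozivni in sorted(fiksni_brojevi.keys(), key=len, reverse=True):
--         if ocisceni_broj.startswith(pozivni):
--             ostatak = ocisceni_broj[len(pozivni):]
--             return (pozivni, ostatak, "fiksna mreža", fiksni_brojevi[pozivni])
--
--     return (None, ocisceni_broj, None, None)
-- ===== SOURCE B (Python) =====
-- # Single length-bucketed lookup table replaces the three sorted-key startswith scans.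
-- _TABELE = {
--     4: {
--         "0800": ("posebne usluge", "Besplatni pozivi"),
--     },
--     3: {
--         "060": ("posebne usluge", "Komercijalni pozivi"),
--         "061": ("posebne usluge", "Glasovanje telefonom"),
--         "064": ("posebne usluge", "Usluge s neprimjerenim sadržajem"),
--         "065": ("posebne usluge", "Nagradne igre"),
--         "069": ("posebne usluge", "Usluge namijenjene djeci"),
--         "072": ("posebne usluge", "Jedinstveni pristupni broj za cijelu državu za posebne usluge"),
--         "091": ("mobilna mreža", "A1 Hrvatska"),
--         "092": ("mobilna mreža", "Tomato"),
--         "095": ("mobilna mreža", "Telemach"),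
--         "097": ("mobilna mreža", "bonbon"),
--         "098": ("mobilna mreža", "Hrvatski Telekom"),
--         "099": ("mobilna mreža", "Hrvatski Telekom"),
--     },
--     2: {
--         "01": ("fiksna mreža", "Grad Zagreb i Zagrebačka županija"),
--     },
-- }
--
-- _FIKSNI_3 = {
--     "020": "Dubrovačko-neretvanska županija",
--     "021": "Splitsko-dalmatinska županija",
--     "022": "Šibensko-kninska županija",
--     "023": "Zadarska županija",
--     "031": "Osječko-baranjska županija",
--     "032": "Vukovarsko-srijemska županija",
--     "033": "Virovitičko-podravska županija",
--     "034": "Požeško-slavonska županija",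
--     "035": "Brodsko-posavska županija",
--     "040": "Međimurska županija",
--     "042": "Varaždinska županija",
--     "043": "Bjelovarsko-bilogorska županija",
--     "044": "Sisačko-moslavačka županija",
--     "047": "Karlovačka županija",
--     "048": "Koprivničko-križevačka županija",
--     "049": "Krapinsko-zagorska županija",
--     "051": "Primorsko-goranska županija",
--     "052": "Istarska županija",
--     "053": "Ličko-senjska županija",
-- }
-- for _k, _v in _FIKSNI_3.items():
--     _TABELE[3][_k] = ("fiksna mreža", _v)
--
--
-- def prepoznaj_pozivni_broj(ocisceni_broj: str):
--     for duljina, tabela in _TABELE.items():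
--         pogodak = tabela.get(ocisceni_broj[:duljina])
--         if pogodak is not None:
--             return (ocisceni_broj[:duljina], ocisceni_broj[duljina:],
--                     pogodak[0], pogodak[1])
--     return (None, ocisceni_broj, None, None)
-- ===== Notes on version B (the rewrite author's own statement) =====
-- stated objective: simpler
-- what changed: Replaces the three per-category sorted-by-length startswith scans with one length-bucketed prefix table: for each candidate length the slice ocisceni_broj[:L] is looked up directly in a dict.
import Mathlib
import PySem

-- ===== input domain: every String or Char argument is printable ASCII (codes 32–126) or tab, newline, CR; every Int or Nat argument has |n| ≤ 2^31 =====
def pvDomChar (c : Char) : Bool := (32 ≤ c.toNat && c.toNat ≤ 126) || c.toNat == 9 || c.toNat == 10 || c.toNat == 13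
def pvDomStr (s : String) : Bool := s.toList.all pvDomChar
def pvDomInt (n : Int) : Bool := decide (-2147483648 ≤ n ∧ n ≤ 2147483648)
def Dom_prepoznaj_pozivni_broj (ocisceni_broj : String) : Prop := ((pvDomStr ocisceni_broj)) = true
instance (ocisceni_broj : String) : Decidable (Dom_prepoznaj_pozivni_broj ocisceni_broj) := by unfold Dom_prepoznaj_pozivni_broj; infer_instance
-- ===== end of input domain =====

-- B replaces A's three sorted-key startswith scans by one length-bucketed prefix-table lookup (objective: simpler).

-- ===== PORT A =====
def pvFiksni : PySem.Dict String String := PySem.Dict.ofList [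
  ("01", "Grad Zagreb i Zagrebačka županija"),
  ("020", "Dubrovačko-neretvanska županija"),
  ("021", "Splitsko-dalmatinska županija"),
  ("022", "Šibensko-kninska županija"),
  ("023", "Zadarska županija"),
  ("031", "Osječko-baranjska županija"),
  ("032", "Vukovarsko-srijemska županija"),
  ("033", "Virovitičko-podravska županija"),
  ("034", "Požeško-slavonska županija"),
  ("035", "Brodsko-posavska županija"),
  ("040", "Međimurska županija"),
  ("042", "Varaždinska županija"),
  ("043", "Bjelovarsko-bilogorska županija"),
  ("044", "Sisačko-moslavačka županija"),
  ("047", "Karlovačka županija"),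
  ("048", "Koprivničko-križevačka županija"),
  ("049", "Krapinsko-zagorska županija"),
  ("051", "Primorsko-goranska županija"),
  ("052", "Istarska županija"),
  ("053", "Ličko-senjska županija")]

def pvMobilni : PySem.Dict String String := PySem.Dict.ofList [
  ("091", "A1 Hrvatska"),
  ("092", "Tomato"),
  ("095", "Telemach"),
  ("097", "bonbon"),
  ("098", "Hrvatski Telekom"),
  ("099", "Hrvatski Telekom")]

def pvPosebne : PySem.Dict String String := PySem.Dict.ofList [
  ("0800", "Besplatni pozivi"),
  ("060", "Komercijalni pozivi"),
  ("061", "Glasovanje telefonom"),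
  ("064", "Usluge s neprimjerenim sadržajem"),
  ("065", "Nagradne igre"),
  ("069", "Usluge namijenjene djeci"),
  ("072", "Jedinstveni pristupni broj za cijelu državu za posebne usluge")]

-- the body of each of A's three for-loops: scan the sorted key list, first startswith hit wins
-- (d.get? pozivni is Python's d[pozivni]; pozivni always comes from d.keys so .getD "" never fires)
def pvScanA (broj : String) (oznaka : String) (d : PySem.Dict String String) :
    List String → Option (Option String × String × Option String × Option String)
  | [] => none
  | pozivni :: rest =>
    if PySem.Str.startswith broj pozivni then
      some (some pozivni, PySem.Str.slice broj (some (PySem.Str.len pozivni)) none,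
            some oznaka, some ((d.get? pozivni).getD ""))
    else pvScanA broj oznaka d rest

def prepoznaj_pozivni_broj (ocisceni_broj : String) : Option String × String × Option String × Option String :=
  match pvScanA ocisceni_broj "posebne usluge" pvPosebne
      (PySem.List.sorted pvPosebne.keys (fun k => PySem.Str.len k) true) with
  | some r => r
  | none =>
    match pvScanA ocisceni_broj "mobilna mreža" pvMobilni
        (PySem.List.sorted pvMobilni.keys (fun k => PySem.Str.len k) true) with
    | some r => r
    | none =>
      match pvScanA ocisceni_broj "fiksna mreža" pvFiksni
          (PySem.List.sorted pvFiksni.keys (fun k => PySem.Str.len k) true) with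
      | some r => r
      | none => (none, ocisceni_broj, none, none)

-- ===== PORT B =====
def pvTabela4 : PySem.Dict String (String × String) := PySem.Dict.ofList [
  ("0800", ("posebne usluge", "Besplatni pozivi"))]

def pvTabela3 : PySem.Dict String (String × String) := PySem.Dict.ofList [
    ("060", ("posebne usluge", "Komercijalni pozivi")),
    ("061", ("posebne usluge", "Glasovanje telefonom")),
    ("064", ("posebne usluge", "Usluge s neprimjerenim sadržajem")),
    ("065", ("posebne usluge", "Nagradne igre")),
    ("069", ("posebne usluge", "Usluge namijenjene djeci")),
    ("072", ("posebne usluge", "Jedinstveni pristupni broj za cijelu državu za posebne usluge")),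
    ("091", ("mobilna mreža", "A1 Hrvatska")),
    ("092", ("mobilna mreža", "Tomato")),
    ("095", ("mobilna mreža", "Telemach")),
    ("097", ("mobilna mreža", "bonbon")),
    ("098", ("mobilna mreža", "Hrvatski Telekom")),
    ("099", ("mobilna mreža", "Hrvatski Telekom")),
    ("020", ("fiksna mreža", "Dubrovačko-neretvanska županija")),
    ("021", ("fiksna mreža", "Splitsko-dalmatinska županija")),
    ("022", ("fiksna mreža", "Šibensko-kninska županija")),
    ("023", ("fiksna mreža", "Zadarska županija")),
    ("031", ("fiksna mreža", "Osječko-baranjska županija")),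
    ("032", ("fiksna mreža", "Vukovarsko-srijemska županija")),
    ("033", ("fiksna mreža", "Virovitičko-podravska županija")),
    ("034", ("fiksna mreža", "Požeško-slavonska županija")),
    ("035", ("fiksna mreža", "Brodsko-posavska županija")),
    ("040", ("fiksna mreža", "Međimurska županija")),
    ("042", ("fiksna mreža", "Varaždinska županija")),
    ("043", ("fiksna mreža", "Bjelovarsko-bilogorska županija")),
    ("044", ("fiksna mreža", "Sisačko-moslavačka županija")),
    ("047", ("fiksna mreža", "Karlovačka županija")),
    ("048", ("fiksna mreža", "Koprivničko-križevačka županija")),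
    ("049", ("fiksna mreža", "Krapinsko-zagorska županija")),
    ("051", ("fiksna mreža", "Primorsko-goranska županija")),
    ("052", ("fiksna mreža", "Istarska županija")),
    ("053", ("fiksna mreža", "Ličko-senjska županija"))]

def pvTabela2 : PySem.Dict String (String × String) := PySem.Dict.ofList [
  ("01", ("fiksna mreža", "Grad Zagreb i Zagrebačka županija"))]

def pvTabele : List (Int × PySem.Dict String (String × String)) :=
  [(4, pvTabela4), (3, pvTabela3), (2, pvTabela2)]

-- B's single loop: per candidate prefix length, one direct table lookup of the slice
def pvScanB (broj : String) :
    List (Int × PySem.Dict String (String × String)) → Option String × String × Option String × Option String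
  | [] => (none, broj, none, none)
  | (duljina, tabela) :: rest =>
    match tabela.get? (PySem.Str.slice broj none (some duljina)) with
    | some (oznaka, opis) =>
      (some (PySem.Str.slice broj none (some duljina)),
       PySem.Str.slice broj (some duljina) none, some oznaka, some opis)
    | none => pvScanB broj rest

def prepoznaj_pozivni_broj_alt (ocisceni_broj : String) : Option String × String × Option String × Option String :=
  pvScanB ocisceni_broj pvTabele

-- ===== PRECONDITION & SPEC =====
def Spec_prepoznaj_pozivni_broj (ocisceni_broj : String) (out : Option String × String × Option String × Option String) : Prop := out = prepoznaj_pozivni_broj_alt ocisceni_broj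
instance (ocisceni_broj : String) (out : Option String × String × Option String × Option String) : Decidable (Spec_prepoznaj_pozivni_broj ocisceni_broj out) := by unfold Spec_prepoznaj_pozivni_broj; infer_instance

-- ===== CLAIM (what is proved, stated in full; the proofs are below) =====
def Claim_equal_prepoznaj_pozivni_broj : Prop := ∀ (ocisceni_broj : String), Dom_prepoznaj_pozivni_broj ocisceni_broj → Spec_prepoznaj_pozivni_broj ocisceni_broj (prepoznaj_pozivni_broj ocisceni_broj)

-- ===== LEMMAS AND PROOFS =====
-- the three sorted key lists of A, evaluated
theorem sortP : PySem.List.sorted pvPosebne.keys (fun k => PySem.Str.len k) true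
    = ["0800","060","061","064","065","069","072"] := by decide

theorem sortM : PySem.List.sorted pvMobilni.keys (fun k => PySem.Str.len k) true
    = ["091","092","095","097","098","099"] := by decide

theorem sortF : PySem.List.sorted pvFiksni.keys (fun k => PySem.Str.len k) true
    = ["020","021","022","023","031","032","033","034","035","040","042","043","044","047","048","049","051","052","053","01"] := by decide

theorem pvFiksni_mk : pvFiksni = PySem.Dict.mk [
  ("01", "Grad Zagreb i Zagrebačka županija"),
  ("020", "Dubrovačko-neretvanska županija"),
  ("021", "Splitsko-dalmatinska županija"),
  ("022", "Šibensko-kninska županija"),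
  ("023", "Zadarska županija"),
  ("031", "Osječko-baranjska županija"),
  ("032", "Vukovarsko-srijemska županija"),
  ("033", "Virovitičko-podravska županija"),
  ("034", "Požeško-slavonska županija"),
  ("035", "Brodsko-posavska županija"),
  ("040", "Međimurska županija"),
  ("042", "Varaždinska županija"),
  ("043", "Bjelovarsko-bilogorska županija"),
  ("044", "Sisačko-moslavačka županija"),
  ("047", "Karlovačka županija"),
  ("048", "Koprivničko-križevačka županija"),
  ("049", "Krapinsko-zagorska županija"),
  ("051", "Primorsko-goranska županija"),
  ("052", "Istarska županija"),
  ("053", "Ličko-senjska županija")] := by decide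

theorem pvMobilni_mk : pvMobilni = PySem.Dict.mk [
  ("091", "A1 Hrvatska"),
  ("092", "Tomato"),
  ("095", "Telemach"),
  ("097", "bonbon"),
  ("098", "Hrvatski Telekom"),
  ("099", "Hrvatski Telekom")] := by decide

theorem pvPosebne_mk : pvPosebne = PySem.Dict.mk [
  ("0800", "Besplatni pozivi"),
  ("060", "Komercijalni pozivi"),
  ("061", "Glasovanje telefonom"),
  ("064", "Usluge s neprimjerenim sadržajem"),
  ("065", "Nagradne igre"),
  ("069", "Usluge namijenjene djeci"),
  ("072", "Jedinstveni pristupni broj za cijelu državu za posebne usluge")] := by decide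

theorem pvTabela4_mk : pvTabela4 = PySem.Dict.mk [
  ("0800", ("posebne usluge", "Besplatni pozivi"))] := by decide

theorem pvTabela3_mk : pvTabela3 = PySem.Dict.mk [
    ("060", ("posebne usluge", "Komercijalni pozivi")),
    ("061", ("posebne usluge", "Glasovanje telefonom")),
    ("064", ("posebne usluge", "Usluge s neprimjerenim sadržajem")),
    ("065", ("posebne usluge", "Nagradne igre")),
    ("069", ("posebne usluge", "Usluge namijenjene djeci")),
    ("072", ("posebne usluge", "Jedinstveni pristupni broj za cijelu državu za posebne usluge")),
    ("091", ("mobilna mreža", "A1 Hrvatska")),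
    ("092", ("mobilna mreža", "Tomato")),
    ("095", ("mobilna mreža", "Telemach")),
    ("097", ("mobilna mreža", "bonbon")),
    ("098", ("mobilna mreža", "Hrvatski Telekom")),
    ("099", ("mobilna mreža", "Hrvatski Telekom")),
    ("020", ("fiksna mreža", "Dubrovačko-neretvanska županija")),
    ("021", ("fiksna mreža", "Splitsko-dalmatinska županija")),
    ("022", ("fiksna mreža", "Šibensko-kninska županija")),
    ("023", ("fiksna mreža", "Zadarska županija")),
    ("031", ("fiksna mreža", "Osječko-baranjska županija")),
    ("032", ("fiksna mreža", "Vukovarsko-srijemska županija")),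
    ("033", ("fiksna mreža", "Virovitičko-podravska županija")),
    ("034", ("fiksna mreža", "Požeško-slavonska županija")),
    ("035", ("fiksna mreža", "Brodsko-posavska županija")),
    ("040", ("fiksna mreža", "Međimurska županija")),
    ("042", ("fiksna mreža", "Varaždinska županija")),
    ("043", ("fiksna mreža", "Bjelovarsko-bilogorska županija")),
    ("044", ("fiksna mreža", "Sisačko-moslavačka županija")),
    ("047", ("fiksna mreža", "Karlovačka županija")),
    ("048", ("fiksna mreža", "Koprivničko-križevačka županija")),
    ("049", ("fiksna mreža", "Krapinsko-zagorska županija")),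
    ("051", ("fiksna mreža", "Primorsko-goranska županija")),
    ("052", ("fiksna mreža", "Istarska županija")),
    ("053", ("fiksna mreža", "Ličko-senjska županija"))] := by decide

theorem pvTabela2_mk : pvTabela2 = PySem.Dict.mk [
  ("01", ("fiksna mreža", "Grad Zagreb i Zagrebačka županija"))] := by decide

theorem bkey (s : String) (p : String) (L : Int) (h0 : 0 ≤ L) (hl : p.toList.length = L.toNat) :
    (p == PySem.Str.slice s none (some L)) = PySem.Chars.startswith s.toList p.toList := by
  rw [Bool.eq_iff_iff, beq_iff_eq, PySem.Chars.startswith_iff, List.prefix_iff_eq_take, hl,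
    String.ext_iff]
  simp [PySem.Str.slice, PySem.List.slice_to _ h0]

theorem slice_eq_key (s : String) (p : List Char) (L : Int) (h0 : 0 ≤ L) (hl : p.length = L.toNat)
    (h : PySem.Chars.startswith s.toList p = true) :
    PySem.Str.slice s none (some L) = String.ofList p := by
  rw [PySem.Chars.startswith_iff, List.prefix_iff_eq_take, hl] at h
  rw [String.ext_iff]
  simp [PySem.Str.slice, PySem.List.slice_to _ h0, ← h]

theorem main_eq (s : String) : prepoznaj_pozivni_broj s = prepoznaj_pozivni_broj_alt s := by
  rw [prepoznaj_pozivni_broj, prepoznaj_pozivni_broj_alt, sortP, sortM, sortF]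
  simp [pvScanA, pvScanB, pvTabele, pvFiksni_mk, pvMobilni_mk, pvPosebne_mk,
    pvTabela4_mk, pvTabela3_mk, pvTabela2_mk, PySem.Dict.get?, List.find?, bkey]
  cases h0 : PySem.Chars.startswith s.toList ['0', '8', '0', '0'] with
  | true =>
    rw [slice_eq_key s ['0', '8', '0', '0'] 4 (by norm_num) (by simp) h0]
    simp
  | false =>
    cases h1 : PySem.Chars.startswith s.toList ['0', '6', '0'] with
    | true =>
      rw [slice_eq_key s ['0', '6', '0'] 3 (by norm_num) (by simp) h1]
      simp
    | false =>
      cases h2 : PySem.Chars.startswith s.toList ['0', '6', '1'] with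
      | true =>
        rw [slice_eq_key s ['0', '6', '1'] 3 (by norm_num) (by simp) h2]
        simp
      | false =>
        cases h3 : PySem.Chars.startswith s.toList ['0', '6', '4'] with
        | true =>
          rw [slice_eq_key s ['0', '6', '4'] 3 (by norm_num) (by simp) h3]
          simp
        | false =>
          cases h4 : PySem.Chars.startswith s.toList ['0', '6', '5'] with
          | true =>
            rw [slice_eq_key s ['0', '6', '5'] 3 (by norm_num) (by simp) h4]
            simp
          | false =>
            cases h5 : PySem.Chars.startswith s.toList ['0', '6', '9'] with
            | true =>
              rw [slice_eq_key s ['0', '6', '9'] 3 (by norm_num) (by simp) h5]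
              simp
            | false =>
              cases h6 : PySem.Chars.startswith s.toList ['0', '7', '2'] with
              | true =>
                rw [slice_eq_key s ['0', '7', '2'] 3 (by norm_num) (by simp) h6]
                simp
              | false =>
                cases h7 : PySem.Chars.startswith s.toList ['0', '9', '1'] with
                | true =>
                  rw [slice_eq_key s ['0', '9', '1'] 3 (by norm_num) (by simp) h7]
                  simp
                | false =>
                  cases h8 : PySem.Chars.startswith s.toList ['0', '9', '2'] with
                  | true =>
                    rw [slice_eq_key s ['0', '9', '2'] 3 (by norm_num) (by simp) h8]
                    simp
                  | false =>
                    cases h9 : PySem.Chars.startswith s.toList ['0', '9', '5'] with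
                    | true =>
                      rw [slice_eq_key s ['0', '9', '5'] 3 (by norm_num) (by simp) h9]
                      simp
                    | false =>
                      cases h10 : PySem.Chars.startswith s.toList ['0', '9', '7'] with
                      | true =>
                        rw [slice_eq_key s ['0', '9', '7'] 3 (by norm_num) (by simp) h10]
                        simp
                      | false =>
                        cases h11 : PySem.Chars.startswith s.toList ['0', '9', '8'] with
                        | true =>
                          rw [slice_eq_key s ['0', '9', '8'] 3 (by norm_num) (by simp) h11]
                          simp
                        | false =>
                          cases h12 : PySem.Chars.startswith s.toList ['0', '9', '9'] with
                          | true =>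
                            rw [slice_eq_key s ['0', '9', '9'] 3 (by norm_num) (by simp) h12]
                            simp
                          | false =>
                            cases h13 : PySem.Chars.startswith s.toList ['0', '2', '0'] with
                            | true =>
                              rw [slice_eq_key s ['0', '2', '0'] 3 (by norm_num) (by simp) h13]
                              simp
                            | false =>
                              cases h14 : PySem.Chars.startswith s.toList ['0', '2', '1'] with
                              | true =>
                                rw [slice_eq_key s ['0', '2', '1'] 3 (by norm_num) (by simp) h14]
                                simp
                              | false =>
                                cases h15 : PySem.Chars.startswith s.toList ['0', '2', '2'] with
                                | true =>
                                  rw [slice_eq_key s ['0', '2', '2'] 3 (by norm_num) (by simp) h15]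
                                  simp
                                | false =>
                                  cases h16 : PySem.Chars.startswith s.toList ['0', '2', '3'] with
                                  | true =>
                                    rw [slice_eq_key s ['0', '2', '3'] 3 (by norm_num) (by simp) h16]
                                    simp
                                  | false =>
                                    cases h17 : PySem.Chars.startswith s.toList ['0', '3', '1'] with
                                    | true =>
                                      rw [slice_eq_key s ['0', '3', '1'] 3 (by norm_num) (by simp) h17]
                                      simp
                                    | false =>
                                      cases h18 : PySem.Chars.startswith s.toList ['0', '3', '2'] with
                                      | true =>
                                        rw [slice_eq_key s ['0', '3', '2'] 3 (by norm_num) (by simp) h18]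
                                        simp
                                      | false =>
                                        cases h19 : PySem.Chars.startswith s.toList ['0', '3', '3'] with
                                        | true =>
                                          rw [slice_eq_key s ['0', '3', '3'] 3 (by norm_num) (by simp) h19]
                                          simp
                                        | false =>
                                          cases h20 : PySem.Chars.startswith s.toList ['0', '3', '4'] with
                                          | true =>
                                            rw [slice_eq_key s ['0', '3', '4'] 3 (by norm_num) (by simp) h20]
                                            simp
                                          | false =>
                                            cases h21 : PySem.Chars.startswith s.toList ['0', '3', '5'] with
                                            | true =>
                                              rw [slice_eq_key s ['0', '3', '5'] 3 (by norm_num) (by simp) h21]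
                                              simp
                                            | false =>
                                              cases h22 : PySem.Chars.startswith s.toList ['0', '4', '0'] with
                                              | true =>
                                                rw [slice_eq_key s ['0', '4', '0'] 3 (by norm_num) (by simp) h22]
                                                simp
                                              | false =>
                                                cases h23 : PySem.Chars.startswith s.toList ['0', '4', '2'] with
                                                | true =>
                                                  rw [slice_eq_key s ['0', '4', '2'] 3 (by norm_num) (by simp) h23]
                                                  simp
                                                | false =>
                                                  cases h24 : PySem.Chars.startswith s.toList ['0', '4', '3'] with
                                                  | true =>
                                                    rw [slice_eq_key s ['0', '4', '3'] 3 (by norm_num) (by simp) h24]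
                                                    simp
                                                  | false =>
                                                    cases h25 : PySem.Chars.startswith s.toList ['0', '4', '4'] with
                                                    | true =>
                                                      rw [slice_eq_key s ['0', '4', '4'] 3 (by norm_num) (by simp) h25]
                                                      simp
                                                    | false =>
                                                      cases h26 : PySem.Chars.startswith s.toList ['0', '4', '7'] with
                                                      | true =>
                                                        rw [slice_eq_key s ['0', '4', '7'] 3 (by norm_num) (by simp) h26]
                                                        simp
                                                      | false =>
                                                        cases h27 : PySem.Chars.startswith s.toList ['0', '4', '8'] with
                                                        | true =>
                                                          rw [slice_eq_key s ['0', '4', '8'] 3 (by norm_num) (by simp) h27]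
                                                          simp
                                                        | false =>
                                                          cases h28 : PySem.Chars.startswith s.toList ['0', '4', '9'] with
                                                          | true =>
                                                            rw [slice_eq_key s ['0', '4', '9'] 3 (by norm_num) (by simp) h28]
                                                            simp
                                                          | false =>
                                                            cases h29 : PySem.Chars.startswith s.toList ['0', '5', '1'] with
                                                            | true =>
                                                              rw [slice_eq_key s ['0', '5', '1'] 3 (by norm_num) (by simp) h29]
                                                              simp
                                                            | false =>
                                                              cases h30 : PySem.Chars.startswith s.toList ['0', '5', '2'] with
                                                              | true =>
                                                                rw [slice_eq_key s ['0', '5', '2'] 3 (by norm_num) (by simp) h30]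
                                                                simp
                                                              | false =>
                                                                cases h31 : PySem.Chars.startswith s.toList ['0', '5', '3'] with
                                                                | true =>
                                                                  rw [slice_eq_key s ['0', '5', '3'] 3 (by norm_num) (by simp) h31]
                                                                  simp
                                                                | false =>
                                                                  cases h32 : PySem.Chars.startswith s.toList ['0', '1'] with
                                                                  | true =>
                                                                    rw [slice_eq_key s ['0', '1'] 2 (by norm_num) (by simp) h32]
                                                                    simp
                                                                  | false =>
                                                                    simp


-- ===== VERDICT (by name: the statement is the Claim_ definition above) =====
theorem prepoznaj_pozivni_broj_spec : Claim_equal_prepoznaj_pozivni_broj := by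
  intro s _
  exact main_eq s
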